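-- pv_equiv track=rewrite | github.com/YuJinUk/Algorithm | 프로그래머스/1/150370. 개인정보 수집 유효기간/개인정보 수집 유효기간.py | sum_func
-- ===== SOURCE A (Python) =====
-- def sum_func(y, m, d, t):
--     if d == 1:
--         d = 28
--         m += t - 1
--         while m > 12:
--             y += 1; m -= 12
--     else:
--         d -= 1; m += t;
--         while m > 12:
--             y += 1; m -= 12
--
--     return y, m, d
-- ===== SOURCE B (Python) =====
-- def sum_func(y, m, d, t):
--     if d == 1:
--         m2, d2 = m + t - 1, 28
--     else:
--         m2, d2 = m + t, d - 1
--     if m2 > 12: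
--         return y + (m2 - 1) // 12, (m2 - 1) % 12 + 1, d2
--     return y, m2, d2
-- ===== Notes on version B (the rewrite author's own statement) =====
-- stated objective: faster
-- what changed: The repeated-subtraction while-loop month normalization is replaced by a guarded closed-form divmod ((m-1)//12, (m-1)%12+1), and the two branches share one adjust-then-normalize structure.
import Mathlib
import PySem

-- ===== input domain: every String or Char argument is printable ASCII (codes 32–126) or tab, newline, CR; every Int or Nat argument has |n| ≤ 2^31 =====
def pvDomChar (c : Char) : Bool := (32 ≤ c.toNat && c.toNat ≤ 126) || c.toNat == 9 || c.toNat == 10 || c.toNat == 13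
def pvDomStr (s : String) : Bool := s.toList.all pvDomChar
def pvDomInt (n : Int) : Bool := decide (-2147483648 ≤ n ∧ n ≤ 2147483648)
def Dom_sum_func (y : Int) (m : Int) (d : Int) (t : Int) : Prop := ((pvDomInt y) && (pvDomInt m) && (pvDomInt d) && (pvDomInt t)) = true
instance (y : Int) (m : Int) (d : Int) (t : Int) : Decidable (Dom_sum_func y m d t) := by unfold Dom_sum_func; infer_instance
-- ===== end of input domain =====

-- B replaces A's repeated-subtraction while-loop month normalization with a guarded closed-form divmod; simpler, same values.


-- ===== PORT A =====
-- the 'while m > 12: y += 1; m -= 12' loop (appears verbatim in both of A's branches)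
def sumFuncWhile (y : Int) (m : Int) : Int × Int :=
  if m > 12 then sumFuncWhile (y + 1) (m - 12) else (y, m)
termination_by m.toNat
decreasing_by omega

def sum_func (y : Int) (m : Int) (d : Int) (t : Int) : Int × Int × Int :=
  if d = 1 then
    let d := (28 : Int)
    let m := m + (t - 1)
    let (y, m) := sumFuncWhile y m
    (y, m, d)
  else
    let d := d - 1
    let m := m + t
    let (y, m) := sumFuncWhile y m
    (y, m, d)

-- ===== PORT B =====
def sum_func_alt (y : Int) (m : Int) (d : Int) (t : Int) : Int × Int × Int :=
  let md : Int × Int := if d = 1 then (m + t - 1, 28) else (m + t, d - 1)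
  if md.1 > 12 then
    (y + PySem.Int.floordiv (md.1 - 1) 12, PySem.Int.mod (md.1 - 1) 12 + 1, md.2)
  else
    (y, md.1, md.2)

-- ===== PRECONDITION & SPEC =====
def Spec_sum_func (y : Int) (m : Int) (d : Int) (t : Int) (out : Int × Int × Int) : Prop := out = sum_func_alt y m d t
instance (y : Int) (m : Int) (d : Int) (t : Int) (out : Int × Int × Int) : Decidable (Spec_sum_func y m d t out) := by unfold Spec_sum_func; infer_instance

-- ===== CLAIM (what is proved, stated in full; the proofs are below) =====
def Claim_equal_sum_func : Prop := ∀ (y : Int) (m : Int) (d : Int) (t : Int), Dom_sum_func y m d t → Spec_sum_func y m d t (sum_func y m d t)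

-- ===== LEMMAS AND PROOFS =====
lemma sumFuncWhile_closed : ∀ (n : Nat) (y m : Int), m.toNat ≤ n →
    sumFuncWhile y m =
      if m > 12 then (y + PySem.Int.floordiv (m - 1) 12, PySem.Int.mod (m - 1) 12 + 1) else (y, m) := by
  intro n
  induction n with
  | zero =>
    intro y m hm
    rw [sumFuncWhile]
    have : ¬ m > 12 := by omega
    simp [this]
  | succ n ih =>
    intro y m hm
    rw [sumFuncWhile]
    by_cases h : m > 12
    · simp only [h, if_pos]
      rw [ih (y + 1) (m - 12) (by omega)]
      have hfd : PySem.Int.floordiv (m - 1) 12 = (m - 1) / 12 :=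
        PySem.Int.floordiv_eq_ediv_of_pos (by omega)
      have hmd : PySem.Int.mod (m - 1) 12 = (m - 1) % 12 :=
        PySem.Int.mod_eq_emod_of_pos (by omega)
      by_cases h2 : m - 12 > 12
      · have hfd2 : PySem.Int.floordiv (m - 12 - 1) 12 = (m - 12 - 1) / 12 :=
          PySem.Int.floordiv_eq_ediv_of_pos (by omega)
        have hmd2 : PySem.Int.mod (m - 12 - 1) 12 = (m - 12 - 1) % 12 :=
          PySem.Int.mod_eq_emod_of_pos (by omega)
        simp only [h2, if_pos, hfd, hmd, hfd2, hmd2, Prod.mk.injEq]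
        omega
      · simp only [h2, if_neg, not_false_iff, hfd, hmd, Prod.mk.injEq]
        omega
    · simp [h]

-- ===== VERDICT (by name: the statement is the Claim_ definition above) =====
theorem sum_func_spec : Claim_equal_sum_func := by
  intro y m d t _
  unfold Spec_sum_func sum_func sum_func_alt
  have e1 : m + (t - 1) = m + t - 1 := by ring
  by_cases hd : d = 1
  · simp only [hd, if_pos, e1,
      sumFuncWhile_closed (m + t - 1).toNat y (m + t - 1) le_rfl]
    split <;> simp
  · simp only [hd, if_neg, not_false_iff,
      sumFuncWhile_closed (m + t).toNat y (m + t) le_rfl]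
    split <;> simp
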